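-- pv_equiv track=rewrite | github.com/qwe16937/slay-all-the-spires | src/sts_agent/controllers/map.py | _format_reachable
-- ===== SOURCE A (Python) =====
-- def _format_reachable(
--     per_floor: list[list[str]],
--     counts: dict[str, int],
--     start_floor: int,
-- ) -> list[str]:
--     """Format per-floor reachable sets with collapsing and summary.
--
--     Collapses consecutive identical floors into ranges.
--     Returns list of formatted lines.
--     """
--     if not per_floor:
--         return ["→ Boss"]
--
--     lines: list[str] = []
--
--     # Collapse consecutive identical floors
--     i = 0
--     while i < len(per_floor):
--         names = per_floor[i]
--         floor_num = start_floor + 1 + i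
--         # Find run of identical floors
--         j = i + 1
--         while j < len(per_floor) and per_floor[j] == names:
--             j += 1
--         run_len = j - i
--         end_floor = start_floor + j
--
--         names_str = ", ".join(names)
--         if run_len == 1:
--             lines.append(f"Floor {floor_num}: {names_str}")
--         else:
--             lines.append(f"Floors {floor_num}-{end_floor}: {names_str}")
--
--         i = j
--
--     lines.append("→ Boss")
--
--     # Summary line
--     summary = _format_summary(counts)
--     lines.append(f"Summary: {summary}")
--
--     return lines
--
-- def _format_summary(counts: dict[str, int]) -> str:
--     """Format node counts as compact summary like '7M 1E 1R 1$ 2?'."""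
--     abbrevs = [
--         ("Monster", "M"),
--         ("Elite", "E"),
--         ("Rest", "R"),
--         ("Shop", "$"),
--         ("Unknown", "?"),
--         ("Treasure", "T"),
--     ]
--     parts = []
--     for name, abbr in abbrevs:
--         c = counts.get(name, 0)
--         if c:
--             parts.append(f"{c}{abbr}")
--     return " ".join(parts) if parts else "boss next"
-- ===== SOURCE B (Python) =====
-- def _format_reachable(
--     per_floor: list[list[str]],
--     counts: dict[str, int],
--     start_floor: int,
-- ) -> list[str]:
--     """Run-length encode the floors first, then format each run."""
--     if not per_floor:
--         return ["→ Boss"]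
--
--     # Build the run-length encoding back-to-front in a single pass.
--     runs: list[tuple[list[str], int]] = []
--     for names in reversed(per_floor):
--         if runs and runs[0][0] == names:
--             runs[0] = (names, runs[0][1] + 1)
--         else:
--             runs.insert(0, (names, 1))
--
--     lines: list[str] = []
--     floor = start_floor + 1
--     for names, k in runs:
--         names_str = ", ".join(names)
--         if k == 1:
--             lines.append(f"Floor {floor}: {names_str}")
--         else:
--             lines.append(f"Floors {floor}-{floor + k - 1}: {names_str}")
--         floor += k
--
--     lines.append("→ Boss")
--     lines.append(f"Summary: {_format_summary(counts)}")
--     return lines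
--
--
-- def _format_summary(counts: dict[str, int]) -> str:
--     abbrevs = [
--         ("Monster", "M"),
--         ("Elite", "E"),
--         ("Rest", "R"),
--         ("Shop", "$"),
--         ("Unknown", "?"),
--         ("Treasure", "T"),
--     ]
--     parts = [f"{counts.get(name, 0)}{abbr}" for name, abbr in abbrevs if counts.get(name, 0)]
--     return " ".join(parts) if parts else "boss next"
-- ===== Notes on version B (the rewrite author's own statement) =====
-- stated objective: alternative
-- what changed: Replaced A's index-jumping outer/inner while loops with a two-phase pipeline (a single back-to-front run-length-encoding pass over the floors, then a formatting pass over the runs carrying a running floor counter), and A's summary accumulator loop with a comprehension.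
import Mathlib
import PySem

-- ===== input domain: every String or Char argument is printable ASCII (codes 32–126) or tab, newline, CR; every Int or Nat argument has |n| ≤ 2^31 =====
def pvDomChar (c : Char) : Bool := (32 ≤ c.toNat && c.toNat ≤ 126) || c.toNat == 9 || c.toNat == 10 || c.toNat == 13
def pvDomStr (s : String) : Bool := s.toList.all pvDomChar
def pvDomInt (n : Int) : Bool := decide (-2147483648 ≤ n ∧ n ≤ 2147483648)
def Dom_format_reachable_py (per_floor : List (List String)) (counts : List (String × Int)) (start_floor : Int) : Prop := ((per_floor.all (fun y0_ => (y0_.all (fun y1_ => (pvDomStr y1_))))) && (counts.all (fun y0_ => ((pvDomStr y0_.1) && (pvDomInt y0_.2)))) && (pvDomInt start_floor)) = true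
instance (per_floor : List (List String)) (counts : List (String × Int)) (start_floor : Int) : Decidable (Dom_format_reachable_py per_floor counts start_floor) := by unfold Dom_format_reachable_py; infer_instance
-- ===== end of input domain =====

-- B replaces A's index-jumping nested while loops by a run-length-encoding pass followed by a
-- formatting pass, and A's summary loop by a comprehension (objective: alternative decomposition).

-- ===== PORT A =====

-- _format_summary, as A writes it: a loop accumulating parts
def pvSummaryA (counts : List (String × Int)) : String :=
  let abbrevs : List (String × String) :=
    [("Monster","M"),("Elite","E"),("Rest","R"),("Shop","$"),("Unknown","?"),("Treasure","T")]
  let parts := abbrevs.foldl (fun (parts : List String) na =>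
    if (PySem.Dict.mk counts).getD na.1 0 ≠ 0 then
      parts ++ [PySem.Int.toStr ((PySem.Dict.mk counts).getD na.1 0) ++ na.2]
    else parts) []
  if parts ≠ [] then PySem.Str.join " " parts else "boss next"

-- inner while: 'j = i + 1; while j < len(per_floor) and per_floor[j] == names: j += 1'
def pvRunEnd (per_floor : List (List String)) (names : List String) (j : Nat) : Nat :=
  if _h : j < per_floor.length ∧ per_floor.getD j [] = names then
    pvRunEnd per_floor names (j + 1)
  else j
termination_by per_floor.length - j
decreasing_by omega

theorem pvRunEnd_ge (per_floor : List (List String)) (names : List String) (j : Nat) :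
    j ≤ pvRunEnd per_floor names j := by
  fun_induction pvRunEnd per_floor names j with
  | case1 j h ih => omega
  | case2 j h => omega

-- outer while over i, appending one formatted line per run of identical floors
def pvLoopA (per_floor : List (List String)) (start_floor : Int) (i : Nat) (lines : List String) : List String :=
  if h : i < per_floor.length then
    let names := per_floor.getD i []
    let floor_num := start_floor + 1 + (i : Int)
    let j := pvRunEnd per_floor names (i + 1)
    let run_len := j - i
    let end_floor := start_floor + (j : Int)
    let names_str := PySem.Str.join ", " names
    let line :=
      if run_len == 1 then "Floor " ++ PySem.Int.toStr floor_num ++ ": " ++ names_str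
      else "Floors " ++ PySem.Int.toStr floor_num ++ "-" ++ PySem.Int.toStr end_floor ++ ": " ++ names_str
    pvLoopA per_floor start_floor j (lines ++ [line])
  else lines
termination_by per_floor.length - i
decreasing_by
  have := pvRunEnd_ge per_floor (per_floor.getD i []) (i + 1)
  omega

def format_reachable_py (per_floor : List (List String)) (counts : List (String × Int)) (start_floor : Int) : List String :=
  if per_floor.isEmpty then ["→ Boss"]
  else
    let lines := pvLoopA per_floor start_floor 0 []
    let lines := lines ++ ["→ Boss"]
    lines ++ ["Summary: " ++ pvSummaryA counts]

-- ===== PORT B =====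

-- _format_summary, as B writes it: a comprehension (filter + map)
def pvSummaryB (counts : List (String × Int)) : String :=
  let abbrevs : List (String × String) :=
    [("Monster","M"),("Elite","E"),("Rest","R"),("Shop","$"),("Unknown","?"),("Treasure","T")]
  let parts := (abbrevs.filter (fun na => decide ((PySem.Dict.mk counts).getD na.1 0 ≠ 0))).map
      (fun na => PySem.Int.toStr ((PySem.Dict.mk counts).getD na.1 0) ++ na.2)
  if parts ≠ [] then PySem.Str.join " " parts else "boss next"

-- one step of the back-to-front run-length encoding: extend the first run or prepend a new one
def pvRleStep (names : List String) (runs : List (List String × Int)) : List (List String × Int) :=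
  match runs with
  | (h, k) :: t => if h = names then (names, k + 1) :: t else (names, (1 : Int)) :: (h, k) :: t
  | [] => [(names, (1 : Int))]

def format_reachable_py_alt (per_floor : List (List String)) (counts : List (String × Int)) (start_floor : Int) : List String :=
  if per_floor.isEmpty then ["→ Boss"]
  else
    -- 'for names in reversed(per_floor): …'
    let runs := per_floor.reverse.foldl (fun runs names => pvRleStep names runs) []
    -- 'for names, k in runs: …' carrying the running floor number and the lines
    let st := runs.foldl (fun (st : Int × List String) r =>
      let names_str := PySem.Str.join ", " r.1
      let line :=
        if r.2 == 1 then "Floor " ++ PySem.Int.toStr st.1 ++ ": " ++ names_str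
        else "Floors " ++ PySem.Int.toStr st.1 ++ "-" ++ PySem.Int.toStr (st.1 + r.2 - 1) ++ ": " ++ names_str
      (st.1 + r.2, st.2 ++ [line])) (start_floor + 1, ([] : List String))
    st.2 ++ ["→ Boss", "Summary: " ++ pvSummaryB counts]

-- ===== PRECONDITION & SPEC =====
def Spec_format_reachable_py (per_floor : List (List String)) (counts : List (String × Int)) (start_floor : Int) (out : List String) : Prop := out = format_reachable_py_alt per_floor counts start_floor
instance (per_floor : List (List String)) (counts : List (String × Int)) (start_floor : Int) (out : List String) : Decidable (Spec_format_reachable_py per_floor counts start_floor out) := by unfold Spec_format_reachable_py; infer_instance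

-- ===== CLAIM (what is proved, stated in full; the proofs are below) =====
def Claim_equal_format_reachable_py : Prop := ∀ (per_floor : List (List String)) (counts : List (String × Int)) (start_floor : Int), Dom_format_reachable_py per_floor counts start_floor → Spec_format_reachable_py per_floor counts start_floor (format_reachable_py per_floor counts start_floor)

-- ===== LEMMAS AND PROOFS =====

-- reference grouping: runs of equal adjacent floors, from the front
def pvG (xs : List (List String)) : List (List String × Int) :=
  match xs with
  | [] => []
  | x :: t =>
      (x, 1 + ((t.takeWhile (fun y => decide (y = x))).length : Int)) ::
        pvG (t.dropWhile (fun y => decide (y = x)))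
termination_by xs.length
decreasing_by
  have := List.length_dropWhile_le (fun y => decide (y = x)) t
  simp at this ⊢; omega

theorem pvG_nil : pvG [] = [] := by rw [pvG.eq_def]

theorem pvG_cons (x : List String) (t : List (List String)) :
    pvG (x :: t) = (x, 1 + ((t.takeWhile (fun y => decide (y = x))).length : Int)) ::
      pvG (t.dropWhile (fun y => decide (y = x))) := by
  rw [pvG.eq_def]

theorem pv_drop_getD (l : List (List String)) (j : Nat) (hj : j < l.length) :
    l.drop j = l.getD j [] :: l.drop (j + 1) := by
  rw [List.drop_eq_getElem_cons hj]
  congr 1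
  simp [List.getD_eq_getElem?_getD, List.getElem?_eq_getElem hj]

-- reference formatting of a run list with a running floor counter
def pvFmt (floor : Int) (runs : List (List String × Int)) : List String :=
  match runs with
  | [] => []
  | (names, k) :: rs =>
      (if k == 1 then "Floor " ++ PySem.Int.toStr floor ++ ": " ++ PySem.Str.join ", " names
       else "Floors " ++ PySem.Int.toStr floor ++ "-" ++ PySem.Int.toStr (floor + k - 1) ++ ": "
            ++ PySem.Str.join ", " names)
      :: pvFmt (floor + k) rs

theorem pvDropWhile_eq_drop {α : Type} (p : α → Bool) (l : List α) :
    l.dropWhile p = l.drop (l.takeWhile p).length := by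
  calc l.dropWhile p = ((l.takeWhile p) ++ (l.dropWhile p)).drop (l.takeWhile p).length :=
        List.drop_left.symm
    _ = l.drop (l.takeWhile p).length := by rw [List.takeWhile_append_dropWhile]

theorem pvRleStep_G (x : List String) (t : List (List String)) :
    pvRleStep x (pvG t) = pvG (x :: t) := by
  cases t with
  | nil => simp [pvG_nil, pvG_cons, pvRleStep]
  | cons y ys =>
    rw [pvG_cons y ys, pvG_cons x (y :: ys)]
    by_cases hxy : y = x
    · subst hxy
      rw [pvRleStep, if_pos rfl]
      simp
      ring
    · rw [pvRleStep, if_neg (by simpa using hxy)]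
      simp [hxy, pvG_cons]

theorem pvRle_eq_G (xs : List (List String)) :
    xs.reverse.foldl (fun runs names => pvRleStep names runs) [] = pvG xs := by
  rw [List.foldl_reverse]
  induction xs with
  | nil => simp [pvG]
  | cons x t ih => simp only [List.foldr_cons, ih, pvRleStep_G]

theorem pvFoldFmt (runs : List (List String × Int)) (floor : Int) (lines : List String) :
    (runs.foldl (fun (st : Int × List String) r =>
      let names_str := PySem.Str.join ", " r.1
      let line :=
        if r.2 == 1 then "Floor " ++ PySem.Int.toStr st.1 ++ ": " ++ names_str
        else "Floors " ++ PySem.Int.toStr st.1 ++ "-" ++ PySem.Int.toStr (st.1 + r.2 - 1) ++ ": " ++ names_str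
      (st.1 + r.2, st.2 ++ [line])) (floor, lines)).2 = lines ++ pvFmt floor runs := by
  induction runs generalizing floor lines with
  | nil => simp [pvFmt]
  | cons r rs ih =>
    obtain ⟨names, k⟩ := r
    simp only [List.foldl_cons, ih, pvFmt, List.append_assoc, List.singleton_append]

theorem pvRunEnd_eq (per_floor : List (List String)) (names : List String) (j : Nat) :
    pvRunEnd per_floor names j
      = j + ((per_floor.drop j).takeWhile (fun y => decide (y = names))).length := by
  fun_induction pvRunEnd per_floor names j with
  | case1 j h ih =>
    obtain ⟨hj, hnm⟩ := h
    have hd := pv_drop_getD per_floor j hj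
    rw [ih, hd, List.takeWhile_cons, if_pos (by simp only [decide_eq_true_eq]; exact hnm)]
    simp; omega
  | case2 j h =>
    rcases Nat.lt_or_ge j per_floor.length with hj | hj
    · have hnm : ¬ per_floor.getD j [] = names := by tauto
      have hd := pv_drop_getD per_floor j hj
      rw [hd, List.takeWhile_cons, if_neg (by simp only [decide_eq_true_eq]; exact hnm)]
      simp
    · simp [List.drop_eq_nil_of_le hj]

theorem pvLoopA_eq (per_floor : List (List String)) (start_floor : Int) :
    ∀ (fuel i : Nat) (lines : List String), per_floor.length - i ≤ fuel →
      pvLoopA per_floor start_floor i lines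
        = lines ++ pvFmt (start_floor + 1 + (i : Int)) (pvG (per_floor.drop i)) := by
  intro fuel
  induction fuel with
  | zero =>
    intro i lines hf
    have hge : per_floor.length ≤ i := by omega
    rw [pvLoopA, dif_neg (by omega)]
    simp [List.drop_eq_nil_of_le hge, pvG_nil, pvFmt]
  | succ fuel ih =>
    intro i lines hf
    rcases Nat.lt_or_ge i per_floor.length with hi | hi
    · rw [pvLoopA, dif_pos hi]
      have hd := pv_drop_getD per_floor i hi
      have hj := pvRunEnd_eq per_floor (per_floor.getD i []) (i + 1)
      set T := ((per_floor.drop (i + 1)).takeWhile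
          (fun y => decide (y = per_floor.getD i []))).length with hT
      rw [ih _ _ (by omega)]
      rw [hd, pvG_cons]
      simp only [← hT]
      have hdw : (per_floor.drop (i + 1)).dropWhile (fun y => decide (y = per_floor.getD i []))
          = per_floor.drop (pvRunEnd per_floor (per_floor.getD i []) (i + 1)) := by
        rw [pvDropWhile_eq_drop, List.drop_drop, ← hT, hj]
      rw [hdw, pvFmt]
      have harith : start_floor + 1 + (i : Int) + (1 + (T : Int))
          = start_floor + 1 + ((pvRunEnd per_floor (per_floor.getD i []) (i + 1) : Nat) : Int) := by
        rw [hj]; push_cast; ring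
      rw [harith, List.append_assoc, List.singleton_append]
      congr 2
      have hrl : pvRunEnd per_floor (per_floor.getD i []) (i + 1) - i = 1 + T := by omega
      by_cases hT0 : T = 0
      · rw [if_pos (show ((pvRunEnd per_floor (per_floor.getD i []) (i + 1) - i == 1) = true) by
              simp only [beq_iff_eq]; omega),
            if_pos (show ((1 + (T : Int) == 1) = true) by simp only [beq_iff_eq]; omega)]
      · rw [if_neg (show ¬ ((pvRunEnd per_floor (per_floor.getD i []) (i + 1) - i == 1) = true) by
              simp only [beq_iff_eq]; omega),
            if_neg (show ¬ ((1 + (T : Int) == 1) = true) by simp only [beq_iff_eq]; omega)]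
        congr 3
        rw [hj]; push_cast; ring
    · rw [pvLoopA, dif_neg (by omega)]
      simp [List.drop_eq_nil_of_le hi, pvG_nil, pvFmt]

theorem pvSummary_eq (counts : List (String × Int)) : pvSummaryA counts = pvSummaryB counts := by
  simp only [pvSummaryA, pvSummaryB, PySem.List.foldl_append_ite, List.nil_append]

-- ===== VERDICT (by name: the statement is the Claim_ definition above) =====
theorem format_reachable_py_spec : Claim_equal_format_reachable_py := by
  intro per_floor counts start_floor _
  unfold Spec_format_reachable_py format_reachable_py format_reachable_py_alt
  by_cases hpf : per_floor.isEmpty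
  · simp [hpf]
  · simp only [hpf, if_false]
    rw [pvRle_eq_G, pvFoldFmt, pvLoopA_eq per_floor start_floor per_floor.length 0 [] (by omega),
      pvSummary_eq]
    simp
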